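-- pv_equiv track=rewrite | github.com/pandingwen2001/auction_application_for_vpp_aggregation | experiment/05_coalition_stress_test/run_coalition_stress_test.py | type_groups
-- ===== SOURCE A (Python) =====
-- from collections import defaultdict
--
-- def type_groups(source_types: list) -> dict:
--     groups = defaultdict(list)
--     for i, typ in enumerate(source_types):
--         groups[str(typ).upper()].append(i)
--     groups["RENEWABLE"] = [
--         i for i, typ in enumerate(source_types)
--         if str(typ).upper() in {"PV", "WT"}
--     ]
--     groups["CONTROLLABLE"] = [
--         i for i, typ in enumerate(source_types)
--         if str(typ).upper() in {"MT", "DG", "DR"}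
--     ]
--     groups["ALL"] = list(range(len(source_types)))
--     return dict(groups)
-- ===== SOURCE B (Python) =====
-- def type_groups(source_types: list) -> dict:
--     uppers = [str(t).upper() for t in source_types]
--     groups = {}
--     for u in uppers:
--         if u not in groups:
--             groups[u] = [i for i, v in enumerate(uppers) if v == u]
--     groups["RENEWABLE"] = sorted(groups.get("PV", []) + groups.get("WT", []))
--     groups["CONTROLLABLE"] = sorted(groups.get("MT", []) + groups.get("DG", []) + groups.get("DR", []))
--     groups["ALL"] = list(range(len(source_types)))
--     return groups
-- ===== Notes on version B (the rewrite author's own statement) =====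
-- stated objective: alternative
-- what changed: B is a distinct-key group-by: it uppercases once, then for each first-occurrence distinct key collects that key's indices with its own scan, and derives RENEWABLE/CONTROLLABLE by sorted merges of the already-built PV/WT and MT/DG/DR groups instead of re-filtering the input as A does.
import Mathlib
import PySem

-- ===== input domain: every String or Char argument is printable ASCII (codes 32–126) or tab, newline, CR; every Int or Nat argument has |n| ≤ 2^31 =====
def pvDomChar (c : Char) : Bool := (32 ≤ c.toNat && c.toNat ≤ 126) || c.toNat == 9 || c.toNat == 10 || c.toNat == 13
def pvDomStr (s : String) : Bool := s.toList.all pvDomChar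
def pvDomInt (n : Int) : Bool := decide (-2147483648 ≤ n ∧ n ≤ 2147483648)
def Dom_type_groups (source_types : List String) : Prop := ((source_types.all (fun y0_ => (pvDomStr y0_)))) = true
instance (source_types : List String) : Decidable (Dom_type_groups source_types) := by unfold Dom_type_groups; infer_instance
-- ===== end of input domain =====

-- B is a distinct-key group-by (one scan per first-occurrence key) whose RENEWABLE/CONTROLLABLE
-- aggregates are sorted merges of the already-built groups; alternative decomposition, same result.

-- ===== PORT A =====
def type_groups (source_types : List String) : List (String × List Int) :=
  let groups : PySem.Dict String (List Int) :=
    (PySem.List.enumerate source_types 0).foldl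
      (fun d p => d.modify (PySem.Str.upper p.2) [] (· ++ [p.1])) PySem.Dict.empty
  let groups := groups.insert "RENEWABLE"
    (((PySem.List.enumerate source_types 0).filter
        (fun p => PySem.Str.upper p.2 == "PV" || PySem.Str.upper p.2 == "WT")).map (·.1))
  let groups := groups.insert "CONTROLLABLE"
    (((PySem.List.enumerate source_types 0).filter
        (fun p => (PySem.Str.upper p.2 == "MT" || PySem.Str.upper p.2 == "DG")
          || PySem.Str.upper p.2 == "DR")).map (·.1))
  let groups := groups.insert "ALL" (PySem.List.pyRange 0 (PySem.List.len source_types) 1)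
  groups.items

-- ===== PORT B =====
def type_groups_alt (source_types : List String) : List (String × List Int) :=
  let uppers := source_types.map PySem.Str.upper
  let groups : PySem.Dict String (List Int) :=
    uppers.foldl
      (fun d u =>
        if d.contains u then d
        else d.insert u (((PySem.List.enumerate uppers 0).filter (fun q => q.2 == u)).map (·.1)))
      PySem.Dict.empty
  let groups := groups.insert "RENEWABLE"
    (PySem.List.sorted (groups.getD "PV" [] ++ groups.getD "WT" []) (fun x => x))
  let groups := groups.insert "CONTROLLABLE"
    (PySem.List.sorted ((groups.getD "MT" [] ++ groups.getD "DG" []) ++ groups.getD "DR" []) (fun x => x))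
  let groups := groups.insert "ALL" (PySem.List.pyRange 0 (PySem.List.len source_types) 1)
  groups.items

-- ===== PRECONDITION & SPEC =====
def Spec_type_groups (source_types : List String) (out : List (String × List Int)) : Prop := out = type_groups_alt source_types
instance (source_types : List String) (out : List (String × List Int)) : Decidable (Spec_type_groups source_types out) := by unfold Spec_type_groups; infer_instance

-- ===== CLAIM (what is proved, stated in full; the proofs are below) =====
def Claim_equal_type_groups : Prop := ∀ (source_types : List String), Dom_type_groups source_types → Spec_type_groups source_types (type_groups source_types)

-- ===== LEMMAS AND PROOFS =====

-- enumerate of a mapped list is the mapped enumerate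
theorem enumerate_map {α β : Type} (f : α → β) (l : List α) (s : Int) :
    PySem.List.enumerate (l.map f) s = (PySem.List.enumerate l s).map (fun p => (p.1, f p.2)) := by
  induction l generalizing s with
  | nil => simp [PySem.List.enumerate_nil]
  | cons x xs ih => simp [PySem.List.enumerate_cons, ih]

-- A's grouping loop, re-keyed through the pre-uppercased enumerate
theorem foldA_eq (l : List String) :
    (PySem.List.enumerate l 0).foldl
        (fun d p => d.modify (PySem.Str.upper p.2) [] (· ++ [p.1])) PySem.Dict.empty
      = (PySem.List.enumerate (l.map PySem.Str.upper) 0).foldl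
        (fun d p => d.modify p.2 [] (· ++ [p.1])) PySem.Dict.empty := by
  rw [enumerate_map]
  exact (List.foldl_map (f := fun p : Int × String => (p.1, PySem.Str.upper p.2))
    (g := fun (d : PySem.Dict String (List Int)) (p : Int × String) =>
      d.modify p.2 [] (· ++ [p.1]))).symm

-- A's filtering comprehensions, re-keyed through the pre-uppercased enumerate
theorem filtA_eq (l : List String) (P : String → Bool) :
    ((PySem.List.enumerate l 0).filter (fun p => P (PySem.Str.upper p.2))).map (·.1)
      = ((PySem.List.enumerate (l.map PySem.Str.upper) 0).filter (fun p => P p.2)).map (·.1) := by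
  rw [enumerate_map, List.filter_map, List.map_map]
  rfl

-- B's loop over the uppercased values, re-keyed through their enumerate
theorem foldl_if_insert_over_snd (M N : List (Int × String)) :
    (M.map (·.2)).foldl (fun d u => if d.contains u then d
        else d.insert u ((N.filter (fun q => q.2 == u)).map (·.1))) PySem.Dict.empty
      = M.foldl (fun d p => if d.contains p.2 then d
        else d.insert p.2 ((N.filter (fun q => q.2 == p.2)).map (·.1))) PySem.Dict.empty :=
  List.foldl_map

-- lookups of A's modify-append group-by fold, as getD (keyed by the second component)
theorem getD_modify_snd (m : List (Int × String)) (k : String) :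
    (m.foldl (fun d p => d.modify p.2 [] (· ++ [p.1])) (PySem.Dict.empty : PySem.Dict String (List Int))).getD k []
      = (m.filter (fun q => q.2 == k)).map (·.1) := by
  rw [show m.foldl (fun d p => d.modify p.2 [] (· ++ [p.1])) (PySem.Dict.empty : PySem.Dict String (List Int))
        = (m.map Prod.swap).foldl (fun d p => d.modify p.1 [] (· ++ [p.2])) PySem.Dict.empty
      from (List.foldl_map (f := Prod.swap)
        (g := fun (d : PySem.Dict String (List Int)) (p : String × Int) => d.modify p.1 [] (· ++ [p.2]))).symm,
     PySem.Dict.getD_foldl_modify_append]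
  simp [List.filter_map, List.map_map, Function.comp_def]

-- two dicts with the same (Nodup) key list and the same lookups are equal
theorem dict_eq_of_keys_get {d d' : PySem.Dict String (List Int)}
    (hn : d.keys.Nodup) (hk : d.keys = d'.keys) (hg : ∀ k, d.get? k = d'.get? k) :
    d = d' := by
  have hn' : d'.keys.Nodup := hk ▸ hn
  apply PySem.Dict.ext
  have hlen : d.items.length = d'.items.length := by
    have := congrArg List.length hk
    simpa [PySem.Dict.keys] using this
  apply List.ext_getElem hlen
  intro i h1 h2
  have hfst : d.items[i].1 = d'.items[i].1 := by
    have h3 : d.keys[i]? = d'.keys[i]? := by rw [hk]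
    simpa [PySem.Dict.keys, List.getElem?_eq_getElem, h1, h2] using h3
  have hm1 : (d.items[i].1, d.items[i].2) ∈ d.items := by
    rw [Prod.mk.eta]; exact List.getElem_mem h1
  have hm2 : (d'.items[i].1, d'.items[i].2) ∈ d'.items := by
    rw [Prod.mk.eta]; exact List.getElem_mem h2
  have e1 := PySem.Dict.get?_of_mem_items d hm1 hn
  have e2 := PySem.Dict.get?_of_mem_items d' hm2 hn'
  have hsnd : some d.items[i].2 = some d'.items[i].2 := by
    rw [← e1, hfst, hg, e2]
  exact Prod.ext hfst (Option.some.inj hsnd)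

-- keys of B's conditional-insert group-by fold
theorem keys_foldl_if_insert (m : List (Int × String)) (F : String → List Int)
    (d : PySem.Dict String (List Int)) :
    (m.foldl (fun d p => if d.contains p.2 then d
        else d.insert p.2 (F p.2)) d).keys = PySem.Set.update d.keys (m.map (·.2)) := by
  have hupd : ∀ (s : PySem.Set String) (x : String) (xs : List String),
      PySem.Set.update s (x :: xs) = PySem.Set.update (PySem.Set.add s x) xs := fun _ _ _ => rfl
  induction m generalizing d with
  | nil => simp [PySem.Set.update]
  | cons p m ih =>
    rw [List.foldl_cons, List.map_cons, hupd]
    by_cases h : d.contains p.2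
    · rw [if_pos h]
      have hmem : p.2 ∈ d.keys := (PySem.Dict.contains_iff_mem_keys d p.2).mp h
      have hadd : PySem.Set.add d.keys p.2 = d.keys := by
        simp [PySem.Set.add, PySem.Set.contains_eq_listContains, hmem]
      rw [hadd]; exact ih d
    · have hc : d.contains p.2 = false := by simpa using h
      rw [if_neg h]
      have hnm : p.2 ∉ d.keys := fun hmem =>
        absurd ((PySem.Dict.contains_iff_mem_keys d p.2).mpr hmem) (by simp [hc])
      have hadd : PySem.Set.add d.keys p.2 = d.keys ++ [p.2] := by
        simp [PySem.Set.add, PySem.Set.contains_eq_listContains, hnm]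
      rw [hadd, ← PySem.Dict.keys_insert_of_not_contains d (F p.2) hc]
      exact ih _

-- lookups of B's conditional-insert group-by fold
theorem get?_foldl_if_insert (m : List (Int × String)) (F : String → List Int)
    (d : PySem.Dict String (List Int)) (k : String) :
    (m.foldl (fun d p => if d.contains p.2 then d
        else d.insert p.2 (F p.2)) d).get? k =
      if d.contains k then d.get? k
      else if k ∈ m.map (·.2) then some (F k) else none := by
  induction m generalizing d with
  | nil =>
    by_cases hc : d.contains k
    · simp [hc]
    · have hc' : d.contains k = false := by simpa using hc
      have hnone : d.get? k = none := by
        rw [PySem.Dict.get?_eq_none_iff_not_mem_keys]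
        exact fun hm => by simp [(PySem.Dict.contains_iff_mem_keys d k).mpr hm] at hc'
      simp [hc', hnone]
  | cons p m ih =>
    rw [List.foldl_cons, List.map_cons]
    by_cases h : d.contains p.2
    · rw [if_pos h, ih]
      by_cases hk : d.contains k
      · simp [hk]
      · have hne : k ≠ p.2 := fun he => by rw [he] at hk; exact hk h
        have hmem : (k ∈ p.2 :: List.map (fun x => x.2) m) ↔ k ∈ List.map (fun x => x.2) m := by
          rw [List.mem_cons]; exact or_iff_right hne
        simp only [hk, hmem]
    · rw [if_neg h, ih]
      have hc : d.contains p.2 = false := by simpa using h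
      by_cases hk : k = p.2
      · subst hk
        simp [PySem.Dict.contains_insert, PySem.Dict.get?_insert_self, hc]
      · rw [PySem.Dict.get?_insert_of_ne d (F p.2) hk]
        have hmem : (k ∈ p.2 :: List.map (fun x => x.2) m) ↔ k ∈ List.map (fun x => x.2) m := by
          rw [List.mem_cons]; exact or_iff_right hk
        have hb : (k == p.2) = false := beq_eq_false_iff_ne.mpr hk
        simp only [PySem.Dict.contains_insert, hmem, hb, Bool.false_or]

-- lookups of A's modify-append group-by fold (keyed by the second component)
theorem get?_foldl_modify_snd (m : List (Int × String)) (k : String) :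
    (m.foldl (fun d p => d.modify p.2 [] (· ++ [p.1])) (PySem.Dict.empty : PySem.Dict String (List Int))).get? k =
      if k ∈ m.map (·.2) then some ((m.filter (fun q => q.2 == k)).map (·.1)) else none := by
  have hkeys : (m.foldl (fun d p => d.modify p.2 [] (· ++ [p.1])) (PySem.Dict.empty : PySem.Dict String (List Int))).keys
      = PySem.Set.ofList (m.map (·.2)) := by
    rw [PySem.Dict.keys_foldl_modify_key]
    simp [PySem.Dict.keys_empty, PySem.Set.update, PySem.Set.ofList_eq_foldl]
  by_cases hmem : k ∈ m.map (·.2)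
  · have hkm : k ∈ (m.foldl (fun d p => d.modify p.2 [] (· ++ [p.1])) (PySem.Dict.empty : PySem.Dict String (List Int))).keys := by
      rw [hkeys]; exact (PySem.Set.mem_ofList _ _).mpr hmem
    have hc := (PySem.Dict.contains_iff_mem_keys _ k).mpr hkm
    have hs : ((m.foldl (fun d p => d.modify p.2 [] (· ++ [p.1])) (PySem.Dict.empty : PySem.Dict String (List Int))).get? k).isSome := by
      rw [← PySem.Dict.contains_eq_isSome_get?]; exact hc
    obtain ⟨v, hv⟩ := Option.isSome_iff_exists.mp hs
    have hgd := PySem.Dict.getD_eq_get?_getD (m.foldl (fun d p => d.modify p.2 [] (· ++ [p.1])) (PySem.Dict.empty : PySem.Dict String (List Int))) k []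
    rw [getD_modify_snd, hv] at hgd
    simp only [Option.getD_some] at hgd
    rw [hv, if_pos hmem, hgd]
  · rw [if_neg hmem]
    rw [PySem.Dict.get?_eq_none_iff_not_mem_keys, hkeys]
    intro hkm
    exact hmem ((PySem.Set.mem_ofList _ _).mp hkm)

-- A's incremental group-by dict equals B's distinct-key group-by dict
theorem groupby_eq (m : List (Int × String)) :
    m.foldl (fun d p => d.modify p.2 [] (· ++ [p.1])) PySem.Dict.empty
      = m.foldl (fun d p => if d.contains p.2 then d
          else d.insert p.2 (((m.filter (fun q => q.2 == p.2)).map (·.1)))) PySem.Dict.empty := by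
  apply dict_eq_of_keys_get
  · exact PySem.Dict.nodup_keys_foldl_modify_key m (fun p => p.2) [] (fun _ p => (· ++ [p.1]))
      PySem.Dict.empty PySem.Dict.nodup_keys_empty
  · rw [PySem.Dict.keys_foldl_modify_key,
        keys_foldl_if_insert m (fun u => (m.filter (fun q => q.2 == u)).map (·.1)) PySem.Dict.empty]
  · intro k
    rw [get?_foldl_modify_snd,
        get?_foldl_if_insert m (fun u => (m.filter (fun q => q.2 == u)).map (·.1)) PySem.Dict.empty k]
    simp [PySem.Dict.contains_empty]

-- B's group lookup with default [] is exactly the key's index slice of m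
theorem getD_if_insert (m : List (Int × String)) (k : String) :
    (m.foldl (fun d p => if d.contains p.2 then d
        else d.insert p.2 (((m.filter (fun q => q.2 == p.2)).map (·.1)))) PySem.Dict.empty).getD k []
      = (m.filter (fun q => q.2 == k)).map (·.1) := by
  rw [PySem.Dict.getD_eq_get?_getD,
      get?_foldl_if_insert m (fun u => (m.filter (fun q => q.2 == u)).map (·.1)) PySem.Dict.empty k]
  by_cases hmem : k ∈ m.map (·.2)
  · simp [hmem, PySem.Dict.contains_empty]
  · have hnil : m.filter (fun q => q.2 == k) = [] := by
      rw [List.filter_eq_nil_iff]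
      intro q hq hbeq
      exact hmem (by simp only [List.mem_map]; exact ⟨q, hq, by simpa using hbeq⟩)
    simp [hmem, PySem.Dict.contains_empty, hnil]

-- filtering a disjunction is a permutation of the two separate filters
theorem filter_or_perm {α : Type} (l : List α) (p q : α → Bool)
    (h : ∀ x ∈ l, ¬(p x = true ∧ q x = true)) :
    (l.filter (fun x => p x || q x)).Perm (l.filter p ++ l.filter q) := by
  induction l with
  | nil => simp
  | cons x xs ih =>
    have hx := h x (by simp)
    have ih' := ih (fun y hy => h y (by simp [hy]))
    by_cases hp : p x = true
    · have hq : q x = false := by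
        rcases Bool.eq_false_or_eq_true (q x) with h1 | h1
        · exact absurd ⟨hp, h1⟩ hx
        · exact h1
      simpa [List.filter_cons, hp, hq] using ih'.cons x
    · have hp' : p x = false := by simpa using hp
      by_cases hq : q x = true
      · simp only [List.filter_cons, hp', hq, Bool.false_or]
        exact (ih'.cons x).trans (List.perm_middle).symm
      · have hq' : q x = false := by simpa using hq
        simpa [List.filter_cons, hp', hq'] using ih'

-- any rearrangement of a filtered slice of an index-increasing list, sorted, is that slice
theorem sorted_of_perm_filter (m : List (Int × String))
    (hm : m.Pairwise (fun p q => p.1 < q.1)) (R : Int × String → Bool) (zs : List Int)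
    (hp : zs.Perm ((m.filter R).map (·.1))) :
    PySem.List.sorted zs (fun x => x) = (m.filter R).map (·.1) := by
  apply PySem.List.sorted_eq_of_perm_of_pairwise_lt
  · exact hp.symm
  · exact List.pairwise_map.mpr (hm.sublist List.filter_sublist)

-- skipping an insert under a different key leaves getD unchanged
theorem getD_insert_ne (d : PySem.Dict String (List Int)) (k k' : String) (v : List Int)
    (h : k' ≠ k) : (d.insert k v).getD k' [] = d.getD k' [] := by
  rw [PySem.Dict.getD_eq_get?_getD, PySem.Dict.get?_insert_of_ne d v h,
      ← PySem.Dict.getD_eq_get?_getD]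

-- the two programs return the same association list
theorem main_eq (l : List String) : type_groups l = type_groups_alt l := by
  simp only [type_groups, type_groups_alt]
  have hpm := PySem.List.pairwise_lt_enumerate (l.map PySem.Str.upper) 0
  have d1 : ∀ x ∈ PySem.List.enumerate (l.map PySem.Str.upper) 0,
      ¬((x.2 == "PV") = true ∧ (x.2 == "WT") = true) := by
    rintro x - ⟨h1, h2⟩
    rw [beq_iff_eq] at h1 h2
    rw [h1] at h2; exact absurd h2 (by decide)
  have d2 : ∀ x ∈ PySem.List.enumerate (l.map PySem.Str.upper) 0,
      ¬((x.2 == "MT") = true ∧ (x.2 == "DG") = true) := by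
    rintro x - ⟨h1, h2⟩
    rw [beq_iff_eq] at h1 h2
    rw [h1] at h2; exact absurd h2 (by decide)
  have d3 : ∀ x ∈ PySem.List.enumerate (l.map PySem.Str.upper) 0,
      ¬((x.2 == "MT" || x.2 == "DG") = true ∧ (x.2 == "DR") = true) := by
    rintro x - ⟨h1, h2⟩
    rw [beq_iff_eq] at h2
    rw [Bool.or_eq_true, beq_iff_eq, beq_iff_eq] at h1
    rcases h1 with h1 | h1 <;> rw [h1] at h2 <;> exact absurd h2 (by decide)
  have hsortren : PySem.List.sorted
      (((PySem.List.enumerate (l.map PySem.Str.upper) 0).filter (fun q => q.2 == "PV")).map (·.1)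
        ++ ((PySem.List.enumerate (l.map PySem.Str.upper) 0).filter (fun q => q.2 == "WT")).map (·.1)) (fun x => x)
      = ((PySem.List.enumerate (l.map PySem.Str.upper) 0).filter (fun p => p.2 == "PV" || p.2 == "WT")).map (·.1) := by
    apply sorted_of_perm_filter _ hpm
    rw [← List.map_append]
    exact ((filter_or_perm (PySem.List.enumerate (l.map PySem.Str.upper) 0)
      (fun q => q.2 == "PV") (fun q => q.2 == "WT") d1).map (·.1)).symm
  have hsortcon : PySem.List.sorted
      ((((PySem.List.enumerate (l.map PySem.Str.upper) 0).filter (fun q => q.2 == "MT")).map (·.1)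
          ++ ((PySem.List.enumerate (l.map PySem.Str.upper) 0).filter (fun q => q.2 == "DG")).map (·.1))
        ++ ((PySem.List.enumerate (l.map PySem.Str.upper) 0).filter (fun q => q.2 == "DR")).map (·.1)) (fun x => x)
      = ((PySem.List.enumerate (l.map PySem.Str.upper) 0).filter
          (fun p => (p.2 == "MT" || p.2 == "DG") || p.2 == "DR")).map (·.1) := by
    apply sorted_of_perm_filter _ hpm
    rw [← List.map_append, ← List.map_append]
    have p1 := filter_or_perm (PySem.List.enumerate (l.map PySem.Str.upper) 0)
      (fun q => q.2 == "MT") (fun q => q.2 == "DG") d2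
    have p2 := filter_or_perm (PySem.List.enumerate (l.map PySem.Str.upper) 0)
      (fun q => q.2 == "MT" || q.2 == "DG") (fun q => q.2 == "DR") d3
    exact ((p2.trans (p1.append_right _)).map (·.1)).symm
  have h2 := foldl_if_insert_over_snd (PySem.List.enumerate (l.map PySem.Str.upper) 0)
    (PySem.List.enumerate (l.map PySem.Str.upper) 0)
  rw [PySem.List.map_snd_enumerate] at h2
  rw [h2, foldA_eq l, groupby_eq]
  rw [getD_if_insert, getD_if_insert, hsortren]
  rw [getD_insert_ne _ _ "MT" _ (by decide), getD_insert_ne _ _ "DG" _ (by decide),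
      getD_insert_ne _ _ "DR" _ (by decide)]
  rw [getD_if_insert, getD_if_insert, getD_if_insert, hsortcon]
  rw [filtA_eq l (fun s => s == "PV" || s == "WT"),
      filtA_eq l (fun s => (s == "MT" || s == "DG") || s == "DR")]

-- ===== VERDICT (by name: the statement is the Claim_ definition above) =====
theorem type_groups_spec : Claim_equal_type_groups := by
  intro l hdom
  exact main_eq l
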